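-- pv_equiv track=rewrite | github.com/NCATS-Tangerine/rhea-beacon | beacon_controller/providers/rhea.py | build_substring_filter
-- ===== SOURCE A (Python) =====
-- from typing import List
--
-- def escape_regex(s:str) -> str:
--     for i in reversed(range(len(s))):
--         if s[i] in '\\^$.|?*+()[]\{\}':
--             s = f'{s[:i]}\\\\{s[i:]}'
--     return s
--
-- def build_substring_filter(field:str, keywords:List[str]) -> str:
--     if isinstance(keywords, str):
--         return build_substring_filter(field, [keywords])
--     elif isinstance(keywords, list) and len(keywords) > 0:
--         keywords = [escape_regex(k.lower()) for k in keywords]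
--         disjuncts = [f'regex(lcase(str(?{field})), "{k}")' for k in keywords]
--         condition = ' || '.join(disjuncts)
--         return f'FILTER ( {condition} ) .'
--     else:
--         return ''
-- ===== SOURCE B (Python) =====
-- from typing import List
--
-- _SPECIALS = frozenset('\\^$.|?*+()[]{}')
--
-- def escape_regex(s: str) -> str:
--     # forward per-character pass: every special char gains two leading backslashes
--     return ''.join('\\\\' + c if c in _SPECIALS else c for c in s)
--
-- def build_substring_filter(field: str, keywords: List[str]) -> str:
--     if isinstance(keywords, str):
--         return build_substring_filter(field, [keywords])
--     if not isinstance(keywords, list) or len(keywords) == 0: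
--         return ''
--     # single pass over the keywords, emitting the final string piece by piece
--     parts = ['FILTER ( ']
--     first = True
--     for k in keywords:
--         if first:
--             first = False
--         else:
--             parts.append(' || ')
--         parts.append(f'regex(lcase(str(?{field})), "{escape_regex(k.lower())}")')
--     parts.append(' ) .')
--     return ''.join(parts)
-- ===== Notes on version B (the rewrite author's own statement) =====
-- stated objective: simpler
-- what changed: escape_regex becomes a single forward per-character pass (join of escaped pieces) instead of A's reversed index scan that re-slices and reassembles the string at each special character, and the FILTER string is emitted piece by piece in one accumulator loop over the keywords with a first-separator flag instead of A's staged list-comprehension + ' || '.join pipeline.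
import Mathlib
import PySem

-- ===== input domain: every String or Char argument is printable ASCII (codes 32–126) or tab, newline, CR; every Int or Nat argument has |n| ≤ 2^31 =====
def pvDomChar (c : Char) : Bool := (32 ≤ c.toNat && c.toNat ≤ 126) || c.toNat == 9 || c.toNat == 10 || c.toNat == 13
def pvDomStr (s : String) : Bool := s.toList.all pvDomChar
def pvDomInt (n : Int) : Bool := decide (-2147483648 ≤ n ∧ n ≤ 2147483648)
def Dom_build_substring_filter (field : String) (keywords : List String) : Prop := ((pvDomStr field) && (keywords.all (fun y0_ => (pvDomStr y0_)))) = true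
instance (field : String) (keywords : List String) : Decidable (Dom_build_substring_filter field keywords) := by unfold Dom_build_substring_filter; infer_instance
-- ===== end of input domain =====

-- B replaces both of A's passes: escape_regex becomes a forward per-character pass joining escaped pieces, and the FILTER string is emitted piece by piece in one accumulator loop over the keywords (no intermediate disjunct list / separator join); simpler, same cost.


-- ===== PORT A =====
-- the characters of the Python literal '\\^$.|?*+()[]\{\}' (the \{ \} escapes keep their backslashes)
def pvSpecialsA : List Char :=
  ['\\','^','$','.','|','?','*','+','(',')','[',']','\\','{','\\','}']

-- 'for i in reversed(range(len(s)))' with body 's = s[:i] + "\\\\" + s[i:]' when s[i] is special.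
-- i is always in range (insertions happen at position i, never before it), so s[i] is cs.getD i
-- and s[:i]/s[i:] are take/drop (exact for 0 ≤ i ≤ len).
def pvEscLoopA : Nat → List Char → List Char
  | 0, cs => cs
  | i + 1, cs =>
      pvEscLoopA i
        (if cs.getD i ' ' ∈ pvSpecialsA then cs.take i ++ '\\' :: '\\' :: cs.drop i else cs)

def pvEscapeRegexA (s : String) : String :=
  String.ofList (pvEscLoopA s.toList.length s.toList)

def build_substring_filter (field : String) (keywords : List String) : String :=
  if keywords.length > 0 then
    let ks := keywords.map (fun k => pvEscapeRegexA (PySem.Str.lower k))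
    let disjuncts := ks.map (fun k => "regex(lcase(str(?" ++ field ++ ")), \"" ++ k ++ "\")")
    "FILTER ( " ++ PySem.Str.join " || " disjuncts ++ " ) ."
  else ""

-- ===== PORT B =====
-- _SPECIALS = frozenset('\\^$.|?*+()[]{}')
def pvSpecialsB : PySem.Set Char :=
  PySem.Set.ofList ['\\','^','$','.','|','?','*','+','(',')','[',']','{','}']

-- the generator's element: '\\\\' + c if c in _SPECIALS else c
def pvEscPieceB (c : Char) : String :=
  if c ∈ pvSpecialsB then String.ofList ['\\', '\\', c] else String.ofList [c]

-- ''.join(... for c in s)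
def pvEscapeRegexB (s : String) : String :=
  PySem.Str.join "" (s.toList.map pvEscPieceB)

-- the f-string emitted for one keyword
def pvDisjB (field k : String) : String :=
  "regex(lcase(str(?" ++ field ++ ")), \"" ++ pvEscapeRegexB (PySem.Str.lower k) ++ "\")"

-- one iteration of the 'for k in keywords' loop: state = (first, parts)
def pvStepB (field : String) (st : Bool × List String) (k : String) : Bool × List String :=
  (false, (if st.1 then st.2 else st.2 ++ [" || "]) ++ [pvDisjB field k])

def build_substring_filter_alt (field : String) (keywords : List String) : String :=
  match keywords with
  | [] => ""
  | _ :: _ =>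
    let st := keywords.foldl (pvStepB field) (true, ["FILTER ( "])
    PySem.Str.join "" (st.2 ++ [" ) ."])

-- ===== PRECONDITION & SPEC =====
def Spec_build_substring_filter (field : String) (keywords : List String) (out : String) : Prop := out = build_substring_filter_alt field keywords
instance (field : String) (keywords : List String) (out : String) : Decidable (Spec_build_substring_filter field keywords out) := by unfold Spec_build_substring_filter; infer_instance

-- ===== CLAIM (what is proved, stated in full; the proofs are below) =====
def Claim_equal_build_substring_filter : Prop := ∀ (field : String) (keywords : List String), Dom_build_substring_filter field keywords → Spec_build_substring_filter field keywords (build_substring_filter field keywords)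

-- ===== LEMMAS AND PROOFS =====

-- character-level form of B's escape piece
def pvEscCharB (c : Char) : List Char :=
  if c ∈ pvSpecialsB then ['\\', '\\', c] else [c]

theorem toList_escPieceB (c : Char) : (pvEscPieceB c).toList = pvEscCharB c := by
  unfold pvEscPieceB pvEscCharB; split <;> simp

-- the same character set is tested by both escapes
theorem mem_specials_iff (c : Char) : c ∈ pvSpecialsA ↔ c ∈ pvSpecialsB := by
  simp [pvSpecialsA, pvSpecialsB, PySem.Set.mem_ofList]
  tauto

-- ''.join is concatenation
theorem join_empty_sep (ps : List (List Char)) :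
    PySem.Chars.join [] ps = ps.flatten := by
  induction ps with
  | nil => simp [PySem.Chars.join_nil]
  | cons p rest ih =>
      cases rest with
      | nil => simp [PySem.Chars.join_singleton]
      | cons q rest' =>
          rw [PySem.Chars.join_cons_cons, ih]
          simp

-- loop invariant for A's reversed escape scan: processing indices (length as)-1 .. 0 of as ++ bs escapes exactly as
theorem escLoopA_append (as bs : List Char) :
    pvEscLoopA as.length (as ++ bs) = as.flatMap pvEscCharB ++ bs := by
  induction as using List.reverseRecOn generalizing bs with
  | nil => simp [pvEscLoopA]
  | append_singleton xs c ih =>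
      have hget : (xs ++ [c] ++ bs).getD xs.length ' ' = c := by
        simp [List.getD, List.append_assoc]
      have hlen : (xs ++ [c]).length = xs.length + 1 := by simp
      rw [hlen]
      show pvEscLoopA xs.length _ = _
      rw [List.append_assoc] at hget ⊢
      rw [hget]
      by_cases h : c ∈ pvSpecialsA
      · rw [if_pos h]
        rw [List.take_left' rfl, List.drop_left' rfl]
        have : xs ++ ('\\' :: '\\' :: ([c] ++ bs)) = xs ++ (pvEscCharB c ++ bs) := by
          simp [pvEscCharB, if_pos ((mem_specials_iff c).1 h)]
        rw [this, ih]
        simp [pvEscCharB, if_pos ((mem_specials_iff c).1 h)]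
      · rw [if_neg h, ih]
        simp [pvEscCharB, if_neg (fun hb => h ((mem_specials_iff c).2 hb))]

theorem escapeRegex_eq (s : String) : pvEscapeRegexA s = pvEscapeRegexB s := by
  rw [← String.toList_inj]
  unfold pvEscapeRegexA pvEscapeRegexB
  have h := escLoopA_append s.toList []
  rw [List.append_nil, List.append_nil] at h
  rw [String.toList_ofList, h, PySem.Str.toList_join,
    show ("" : String).toList = [] by simp, join_empty_sep, List.map_map,
    show String.toList ∘ pvEscPieceB = pvEscCharB from funext toList_escPieceB]
  simp [List.flatMap_def]

-- A's disjunct builder, after rewriting its escape to B's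
def pvDisjA (field k : String) : String :=
  "regex(lcase(str(?" ++ field ++ ")), \"" ++ pvEscapeRegexA (PySem.Str.lower k) ++ "\")"

theorem disj_eq (field k : String) : pvDisjA field k = pvDisjB field k := by
  unfold pvDisjA pvDisjB; rw [escapeRegex_eq]

-- B's fold after the first keyword: appends ' || ' + disjunct per keyword
theorem foldl_stepB_false (field : String) (ks : List String) (ps : List String) :
    ks.foldl (pvStepB field) (false, ps)
      = (false, ps ++ ks.flatMap (fun k => [" || ", pvDisjB field k])) := by
  induction ks generalizing ps with
  | nil => simp
  | cons k rest ih =>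
      rw [List.foldl_cons]
      show rest.foldl (pvStepB field) (false, (ps ++ [" || "]) ++ [pvDisjB field k]) = _
      rw [ih]
      simp

-- A's ' || '.join of the disjuncts, char-level, matches B's emitted pieces
theorem joinA_eq (field k : String) (rest : List String) :
    PySem.Chars.join " || ".toList (((k :: rest).map (pvDisjA field)).map String.toList)
      = (pvDisjB field k).toList
        ++ ((rest.flatMap (fun k => [" || ", pvDisjB field k])).map String.toList).flatten := by
  induction rest generalizing k with
  | nil => simp [PySem.Chars.join_singleton, disj_eq]
  | cons e rest' ih =>
      simp only [List.map_cons] at ih ⊢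
      rw [PySem.Chars.join_cons_cons, ih e]
      simp [disj_eq]

-- ===== VERDICT (by name: the statement is the Claim_ definition above) =====
theorem build_substring_filter_spec : Claim_equal_build_substring_filter := by
  intro field keywords _
  unfold Spec_build_substring_filter
  cases keywords with
  | nil => rfl
  | cons k rest =>
      show build_substring_filter field (k :: rest) = _
      unfold build_substring_filter build_substring_filter_alt
      rw [← String.toList_inj]
      simp only [List.length_cons, Nat.succ_pos, if_pos]
      rw [List.foldl_cons]
      show _ = (PySem.Str.join "" ((rest.foldl (pvStepB field) (pvStepB field (true, ["FILTER ( "]) k)).2 ++ [" ) ."])).toList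
      have hstep : pvStepB field (true, ["FILTER ( "]) k = (false, ["FILTER ( ", pvDisjB field k]) := rfl
      rw [hstep, foldl_stepB_false]
      rw [List.map_map,
        show ((fun k => "regex(lcase(str(?" ++ field ++ ")), \"" ++ k ++ "\")") ∘
              fun k => pvEscapeRegexA (PySem.Str.lower k)) = pvDisjA field from rfl]
      simp only [String.toList_append]
      rw [PySem.Str.toList_join, joinA_eq, PySem.Str.toList_join,
        show ("" : String).toList = [] by simp, join_empty_sep]
      simp
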